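-- pv_equiv track=rewrite | github.com/6jp9/Intership-tasks | task4.py | lss
-- ===== SOURCE A (Python) =====
-- def lss(string, i=0, lst=None):
--     if lst is None:
--         lst = []
--     if i>=len(string):
--         return lst
--     sub = ''
--     while i < len(string) and string[i] not in sub:
--         sub += string[i]
--         i += 1
--     lst.append(sub)
--     return lss(string,i+1,lst)
-- ===== SOURCE B (Python) =====
-- def lss(string, i=0, lst=None):
--     # Iterative single pass over the remaining characters, with a set for
--     # repeat detection instead of rescanning the growing run.
--     if lst is None:
--         lst = []
--     chars = string[i:]
--     m = len(chars)
--     pos = 0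
--     while pos < m:
--         seen = set()
--         j = pos
--         while j < m and chars[j] not in seen:
--             seen.add(chars[j])
--             j += 1
--         lst.append(chars[pos:j])
--         pos = j + 1
--     return lst
-- ===== Notes on version B (the rewrite author's own statement) =====
-- stated objective: alternative
-- what changed: Replaced A's per-run tail recursion, which rescans the growing run string for each character, with one iterative pass over the remaining characters using a set for repeat detection.
-- intended difference: For an in-range negative start index on a string of at least two characters, A's index walk wraps: it reads the tail and then continues from the head of the string again, returning runs of tail-plus-whole-string, while B returns the runs of just the remaining suffix, which is the intended meaning of a start position. — e.g. on lss("ab", -1, none): A returns ["ba"], B returns ["b"]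
import Mathlib
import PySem

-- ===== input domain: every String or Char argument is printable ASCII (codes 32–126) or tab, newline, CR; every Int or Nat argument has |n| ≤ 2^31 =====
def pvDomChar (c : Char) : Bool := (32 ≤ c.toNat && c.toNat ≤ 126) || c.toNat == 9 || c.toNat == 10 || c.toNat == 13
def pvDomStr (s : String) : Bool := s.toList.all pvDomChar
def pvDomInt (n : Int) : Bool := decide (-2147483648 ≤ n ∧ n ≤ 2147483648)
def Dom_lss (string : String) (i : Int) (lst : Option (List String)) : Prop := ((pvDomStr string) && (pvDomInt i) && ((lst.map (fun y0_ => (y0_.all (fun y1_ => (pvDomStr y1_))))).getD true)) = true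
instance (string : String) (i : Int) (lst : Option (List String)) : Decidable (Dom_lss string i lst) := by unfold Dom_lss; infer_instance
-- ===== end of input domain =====

-- B replaces A's recursion-per-run (which rescans the growing run for each
-- character) with one iterative pass over the suffix string[i:] using a set
-- for repeat detection.  Both A and B append to the caller's list in place;
-- the theorems are about the return value.  On an in-range negative start
-- index A's index walk wraps around to the head of the string — an accident
-- of Python negative indexing — while B partitions just the suffix; that is
-- the stated intended difference D_ below.  Loops are ported with a fuel
-- parameter chosen large enough to never run out on any admitted input.

-- ===== PORT A =====
-- inner 'while i < len(string) and string[i] not in sub' loop of A; returns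
-- the final (i, sub).  ('string[i] not in sub' is char membership, since
-- string[i] is a single character.)
def lssInner (s : List Char) (i : Int) (sub : List Char) : Nat → Int × List Char
  | 0 => (i, sub)
  | fuel + 1 =>
    if i < PySem.List.len s then
      match PySem.List.pyGet? s i with
      | some c => if c ∈ sub then (i, sub) else lssInner s (i + 1) (sub ++ [c]) fuel
      | none => (i, sub)  -- Python raises IndexError here (excluded by Pre_)
    else (i, sub)

-- the recursive body of A after the 'lst is None' default is resolved
def lssAux (s : List Char) (i : Int) (lst : List String) : Nat → List String
  | 0 => lst
  | fuel + 1 =>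
    if PySem.List.len s ≤ i then lst
    else
      let r := lssInner s i [] (PySem.List.len s - i).toNat
      lssAux s (r.1 + 1) (lst ++ [String.ofList r.2]) fuel

def lss (string : String) (i : Int) (lst : Option (List String)) : List String :=
  lssAux string.toList i (lst.getD []) (2 * string.toList.length + 2)

-- ===== PORT B =====
-- inner 'while j < m and chars[j] not in seen' loop of B; returns the final j
def altRun (chars : List Char) (j : Int) (seen : PySem.Set Char) : Nat → Int
  | 0 => j
  | fuel + 1 =>
    if j < PySem.List.len chars then
      match PySem.List.pyGet? chars j with
      | some c =>
          if PySem.Set.contains seen c then j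
          else altRun chars (j + 1) (PySem.Set.add seen c) fuel
      | none => j
    else j

-- outer 'while pos < m' loop of B
def altLoop (chars : List Char) (pos : Int) (lst : List String) : Nat → List String
  | 0 => lst
  | fuel + 1 =>
    if pos < PySem.List.len chars then
      let j := altRun chars pos PySem.Set.empty (PySem.List.len chars - pos).toNat
      altLoop chars (j + 1)
        (lst ++ [String.ofList (PySem.List.slice chars (some pos) (some j))]) fuel
    else lst

def lss_alt (string : String) (i : Int) (lst : Option (List String)) : List String :=
  let l0 := lst.getD []
  let chars := PySem.List.slice string.toList (some i) none
  altLoop chars 0 l0 (chars.length + 1)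

-- ===== PRECONDITION & SPEC =====
-- Pre_ excludes exactly the inputs where A raises IndexError:
-- a start index below -len(string).
def Pre_lss (string : String) (i : Int) (lst : Option (List String)) : Prop :=
  -(string.toList.length : Int) ≤ i
instance (string : String) (i : Int) (lst : Option (List String)) : Decidable (Pre_lss string i lst) := by unfold Pre_lss; infer_instance

def pvWitness_lss : String × Int × Option (List String) := ("abcabc", 0, none)

-- For an in-range negative start index on a string of at least two
-- characters, A's index walk wraps: it reads the tail and then continues from
-- the head of the string again, returning runs of tail-plus-whole-string,
-- while B returns the runs of just the remaining suffix, which is the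
-- intended meaning of a start position.
def D_lss (string : String) (i : Int) (lst : Option (List String)) : Prop :=
  -(string.toList.length : Int) ≤ i ∧ i < 0 ∧ 2 ≤ string.toList.length
instance (string : String) (i : Int) (lst : Option (List String)) : Decidable (D_lss string i lst) := by unfold D_lss; infer_instance

def Spec_lss (string : String) (i : Int) (lst : Option (List String)) (out : List String) : Prop := ¬ D_lss string i lst → out = lss_alt string i lst
instance (string : String) (i : Int) (lst : Option (List String)) (out : List String) : Decidable (Spec_lss string i lst out) := by unfold Spec_lss; infer_instance

def pvDiffWitness_lss : String × Int × Option (List String) := ("ab", -1, none)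
def pvDiffWitnessOut_lss : (List String) × (List String) := (["ba"], ["b"])

-- ===== CLAIM (what is proved, stated in full; the proofs are below) =====
def Claim_unchanged_lss : Prop := ∀ (string : String) (i : Int) (lst : Option (List String)), Dom_lss string i lst → Pre_lss string i lst → Spec_lss string i lst (lss string i lst)
def Claim_changed_lss : Prop := Dom_lss (pvDiffWitness_lss.1) (pvDiffWitness_lss.2.1) (pvDiffWitness_lss.2.2) ∧ Pre_lss (pvDiffWitness_lss.1) (pvDiffWitness_lss.2.1) (pvDiffWitness_lss.2.2) ∧ D_lss (pvDiffWitness_lss.1) (pvDiffWitness_lss.2.1) (pvDiffWitness_lss.2.2) ∧ lss (pvDiffWitness_lss.1) (pvDiffWitness_lss.2.1) (pvDiffWitness_lss.2.2) = pvDiffWitnessOut_lss.1 ∧ lss_alt (pvDiffWitness_lss.1) (pvDiffWitness_lss.2.1) (pvDiffWitness_lss.2.2) = pvDiffWitnessOut_lss.2 ∧ pvDiffWitnessOut_lss.1 ≠ pvDiffWitnessOut_lss.2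

-- ===== LEMMAS AND PROOFS =====

theorem slice_empty (chars : List Char) (p : Int) (hp : 0 ≤ p) :
    PySem.List.slice chars (some p) (some p) = [] := by
  rw [PySem.List.slice_toNat chars hp hp]
  simp

theorem slice_cons (chars : List Char) (p j : Int) (hp : 0 ≤ p) (hj : p + 1 ≤ j)
    (c : Char) (hc : PySem.List.pyGet? chars p = some c) :
    PySem.List.slice chars (some p) (some j)
      = c :: PySem.List.slice chars (some (p + 1)) (some j) := by
  rw [PySem.List.slice_toNat chars hp (by omega),
      PySem.List.slice_toNat chars (by omega) (by omega)]
  rw [PySem.List.pyGet?_of_nonneg _ hp] at hc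
  have hlt : p.toNat < chars.length := by
    by_contra hx
    rw [List.getElem?_eq_none (by omega)] at hc
    simp at hc
  have hdrop : chars.drop p.toNat = c :: chars.drop (p.toNat + 1) := by
    rw [List.drop_eq_getElem_cons hlt]
    rw [List.getElem?_eq_getElem hlt] at hc
    injection hc with hc
    simp [hc]
  rw [hdrop, show j.toNat - p.toNat = (j.toNat - (p + 1).toNat) + 1 by omega,
      List.take_succ_cons, show (p + 1).toNat = p.toNat + 1 by omega]

theorem altRun_ge (chars : List Char) :
    ∀ (f : Nat) (j : Int) (seen : PySem.Set Char), j ≤ altRun chars j seen f := by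
  intro f
  induction f with
  | zero => intro j seen; simp [altRun]
  | succ f ih =>
    intro j seen
    rw [altRun]
    split
    · split
      · split
        · exact le_refl j
        · rename_i c _ _
          exact le_trans (by omega) (ih (j + 1) (seen.add c))
      · exact le_refl j
    · exact le_refl j

theorem inner_corr (s chars : List Char) (i0 : Int)
    (hm : (chars.length : Int) = (s.length : Int) - i0)
    (Hget : ∀ p : Int, 0 ≤ p → PySem.List.pyGet? chars p = PySem.List.pyGet? s (i0 + p)) :
    ∀ (f : Nat) (p : Int) (seen : PySem.Set Char) (sub : List Char), 0 ≤ p →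
    (∀ c, c ∈ seen ↔ c ∈ sub) →
    lssInner s (i0 + p) sub f
      = (i0 + altRun chars p seen f,
         sub ++ PySem.List.slice chars (some p) (some (altRun chars p seen f))) := by
  intro f
  induction f with
  | zero => intro p seen sub hp hinv; simp [lssInner, altRun, slice_empty chars p hp]
  | succ f ih =>
    intro p seen sub hp hinv
    by_cases hlt : p < (chars.length : Int)
    · have hs : i0 + p < (s.length : Int) := by omega
      cases hg : PySem.List.pyGet? chars p with
      | none =>
        have hg' : PySem.List.pyGet? s (i0 + p) = none := (Hget p hp).symm.trans hg
        simp [lssInner, altRun, PySem.List.len_eq, hs, hlt, hg, hg',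
              slice_empty chars p hp]
      | some c =>
        have hg' : PySem.List.pyGet? s (i0 + p) = some c := (Hget p hp).symm.trans hg
        by_cases hc : c ∈ seen
        · have hmem : c ∈ sub := (hinv c).mp hc
          simp [lssInner, altRun, PySem.List.len_eq, hs, hlt, hg, hg', hc, hmem,
                slice_empty chars p hp]
        · have hnm : c ∉ sub := fun hx => hc ((hinv c).mpr hx)
          have hinv' : ∀ d, d ∈ PySem.Set.add seen c ↔ d ∈ sub ++ [c] := by
            intro d
            rw [PySem.Set.mem_add]
            simp [← hinv d]
          have hrec := ih (p + 1) (seen.add c) (sub ++ [c]) (by omega) hinv'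
          rw [show i0 + (p + 1) = i0 + p + 1 by ring] at hrec
          have hjA : p + 1 ≤ altRun chars (p + 1) (seen.add c) f :=
            altRun_ge chars f (p + 1) (seen.add c)
          have hslice := slice_cons chars p (altRun chars (p + 1) (seen.add c) f) hp hjA c hg
          simp [lssInner, altRun, PySem.List.len_eq, hs, hlt, hg, hg', hc, hnm]
          simp [hc] at hrec hslice
          rw [hrec, hslice]
    · have hs : ¬ (i0 + p < (s.length : Int)) := by omega
      simp [lssInner, altRun, PySem.List.len_eq, hs, hlt, slice_empty chars p hp]

theorem outer_corr (s chars : List Char) (i0 : Int)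
    (hm : (chars.length : Int) = (s.length : Int) - i0)
    (Hget : ∀ p : Int, 0 ≤ p → PySem.List.pyGet? chars p = PySem.List.pyGet? s (i0 + p)) :
    ∀ (fB fA : Nat) (p : Int) (lst : List String), 0 ≤ p →
    (chars.length : Int) - p < fA → (chars.length : Int) - p < fB →
    lssAux s (i0 + p) lst fA = altLoop chars p lst fB := by
  intro fB
  induction fB with
  | zero =>
    intro fA p lst hp hA hB
    have hstop : (s.length : Int) ≤ i0 + p := by omega
    cases fA with
    | zero => simp [lssAux, altLoop]
    | succ fA => simp [lssAux, altLoop, PySem.List.len_eq, hstop]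
  | succ fB ih =>
    intro fA p lst hp hA hB
    by_cases hlt : p < (chars.length : Int)
    · cases fA with
      | zero => omega
      | succ fA =>
        have hinner := inner_corr s chars i0 hm Hget
          ((PySem.List.len chars - p).toNat) p PySem.Set.empty [] hp
          (by intro c; simp [PySem.Set.empty])
        have hjA : p ≤ altRun chars p PySem.Set.empty ((PySem.List.len chars - p).toNat) :=
          altRun_ge chars _ p PySem.Set.empty
        rw [lssAux, altLoop]
        rw [if_neg (by simp only [PySem.List.len_eq]; omega),
            if_pos (by simp only [PySem.List.len_eq]; omega)]
        rw [show (PySem.List.len s - (i0 + p)).toNat = (PySem.List.len chars - p).toNat by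
              simp only [PySem.List.len_eq]; omega]
        simp only [hinner, List.nil_append]
        rw [show i0 + altRun chars p PySem.Set.empty ((PySem.List.len chars - p).toNat) + 1
              = i0 + (altRun chars p PySem.Set.empty ((PySem.List.len chars - p).toNat) + 1) by ring]
        exact ih fA _ _ (by omega) (by omega) (by omega)
    · have hstop : (s.length : Int) ≤ i0 + p := by omega
      cases fA with
      | zero => simp [lssAux, altLoop, PySem.List.len_eq, hlt]
      | succ fA => simp [lssAux, altLoop, PySem.List.len_eq, hstop, hlt]

-- the one point inside Pre_ with a negative index but outside D_:
-- a single-character string with i = -1; both sides produce that character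
theorem single_char_case (c : Char) (s : String) (hs : s.toList = [c])
    (lst : Option (List String)) : lss s (-1) lst = lss_alt s (-1) lst := by
  have h1 : PySem.List.pyGet? [c] (-1) = some c := by
    have := PySem.List.pyGet?_neg_natCast [c] 1 (by omega) (by simp)
    simpa using this
  have h0 : PySem.List.pyGet? [c] (0 : Int) = some c := by
    rw [PySem.List.pyGet?_of_nonneg _ (by omega)]
    simp
  have hce : ∀ d : Char, PySem.Set.empty.contains d = false := fun d => rfl
  have hinner : lssInner [c] (-1) [] 2 = (0, [c]) := by
    rw [show (2 : Nat) = 1 + 1 from rfl, lssInner,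
        if_pos (by simp [PySem.List.len_eq]), h1]
    simp only [List.not_mem_nil, if_false, List.nil_append]
    norm_num
    rw [show (1 : Nat) = 0 + 1 from rfl, lssInner,
        if_pos (by simp [PySem.List.len_eq]), h0]
    simp
  have hA : lss s (-1) lst = lst.getD [] ++ [String.ofList [c]] := by
    simp only [lss, hs]
    rw [show 2 * ([c] : List Char).length + 2 = 3 + 1 from rfl, lssAux,
        if_neg (by simp [PySem.List.len_eq])]
    rw [show ((PySem.List.len [c] - (-1)).toNat) = 2 by simp [PySem.List.len_eq]]
    simp only [hinner]
    rw [show (3 : Nat) = 2 + 1 from rfl, lssAux,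
        if_pos (by simp [PySem.List.len_eq])]
  have hrun : altRun [c] 0 PySem.Set.empty 1 = 1 := by
    rw [show (1 : Nat) = 0 + 1 from rfl, altRun,
        if_pos (by simp [PySem.List.len_eq]), h0]
    simp only [hce, Bool.false_eq_true, if_false]
    rw [altRun]
    norm_num
  have hB : lss_alt s (-1) lst = lst.getD [] ++ [String.ofList [c]] := by
    simp only [lss_alt, hs]
    rw [PySem.List.slice_from_neg_one]
    simp only [List.length_cons, List.length_nil]
    rw [show ([c] : List Char).drop (1 - 1) = [c] from rfl]
    rw [show ([c] : List Char).length + 1 = 1 + 1 from rfl, altLoop,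
        if_pos (by simp [PySem.List.len_eq])]
    rw [show ((PySem.List.len [c] - 0).toNat) = 1 by simp [PySem.List.len_eq]]
    rw [hrun]
    have hslice : PySem.List.slice ([c] : List Char) (some (0 : Int)) (some (1 : Int)) = [c] := by
      rw [PySem.List.slice_toNat [c] (by omega) (by omega)]
      simp
    simp only [hslice]
    rw [show (1 : Nat) = 0 + 1 from rfl, altLoop,
        if_neg (by simp [PySem.List.len_eq])]
  rw [hA, hB]

-- ===== VERDICT (by name: the statements are the Claim_ definitions above) =====
theorem lss_spec : Claim_unchanged_lss := by
  intro string i lst _ hpre hnD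
  unfold Pre_lss at hpre
  unfold D_lss at hnD
  by_cases hi : i ≥ (string.toList.length : Int)
  · -- i past the end: A stops at once, B's suffix is empty
    simp only [lss, lss_alt]
    rw [show 2 * string.toList.length + 2 = (2 * string.toList.length + 1) + 1 from rfl]
    rw [lssAux, if_pos (by simp only [PySem.List.len_eq]; omega)]
    have hempty : PySem.List.slice string.toList (some i) none = [] := by
      rw [PySem.List.slice_from _ (by omega)]
      apply List.drop_eq_nil_of_le
      omega
    rw [hempty]
    rw [show ([] : List Char).length + 1 = 0 + 1 from rfl, altLoop,
        if_neg (by simp [PySem.List.len_eq])]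
  · by_cases hneg : i < 0
    · -- outside D_ this forces a single-character string with i = -1
      have hlen : string.toList.length = 1 := by
        rcases Nat.lt_or_ge string.toList.length 2 with h | h
        · omega
        · exact absurd ⟨hpre, hneg, h⟩ hnD
      have hi1 : i = -1 := by omega
      obtain ⟨c, hc⟩ : ∃ c, string.toList = [c] := by
        cases h : string.toList with
        | nil => simp [h] at hlen
        | cons a t =>
          cases t with
          | nil => exact ⟨a, rfl⟩
          | cons b u => simp [h] at hlen
      subst hi1
      exact single_char_case c string hc lst
    · -- the main case: 0 ≤ i < len
      push Not at hneg hi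
      simp only [lss, lss_alt]
      have hchars : PySem.List.slice string.toList (some i) none
          = string.toList.drop i.toNat := PySem.List.slice_from _ hneg
      have hm : ((string.toList.drop i.toNat).length : Int)
          = (string.toList.length : Int) - i := by
        simp only [List.length_drop]
        omega
      have Hget : ∀ p : Int, 0 ≤ p →
          PySem.List.pyGet? (string.toList.drop i.toNat) p
            = PySem.List.pyGet? string.toList (i + p) := by
        intro p hp
        rw [PySem.List.pyGet?_of_nonneg _ hp, PySem.List.pyGet?_of_nonneg _ (by omega)]
        rw [List.getElem?_drop]
        congr 1; omega
      have hmain := outer_corr string.toList (string.toList.drop i.toNat) i hm Hget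
        ((string.toList.drop i.toNat).length + 1) (2 * string.toList.length + 2) 0
        (lst.getD []) le_rfl (by omega) (by omega)
      rw [add_zero] at hmain
      rw [hchars]
      exact hmain

theorem lss_changed : Claim_changed_lss := by
  unfold Claim_changed_lss; decide
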